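-- pv_equiv track=rewrite | github.com/deysantanu84/python-portfolio | problemSolving/dynamicProgramming/nDigitNumbers.py | solve
-- ===== SOURCE A (Python) =====
-- def solve(A, B):
--     resultGrid = [[0] * (B + 1) for _ in range(A + 1)]
--     resultGrid[0][0] = 1
--
--     for i in range(A):
--         for j in range(B):
--             for digit in range(10):
--                 if j + digit <= B:
--                     resultGrid[i + 1][j + digit] += resultGrid[i][j]
--                 else:
--                     break
--
--     return resultGrid[A][B] % 1000000007
-- ===== SOURCE B (Python) =====
-- def solve(A, B):
--     # Count A-digit numbers (no leading zero) with digit sum B, mod 1e9+7: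
--     # one DP row, first digit 1..9, then a 10-wide sliding-window pass per
--     # remaining digit, reducing mod M at every step.
--     M = 1000000007
--     if A == 0:
--         return 1 if B == 0 else 0
--     f = [0] * (B + 1)
--     for d in range(1, 10):
--         if d <= B:
--             f[d] = 1
--     for _ in range(A - 1):
--         g = []
--         window = 0
--         for s in range(B + 1):
--             window += f[s]
--             if s >= 10:
--                 window -= f[s - 10]
--             g.append(window % M)
--         f = g
--     return f[B] % M
-- ===== Notes on version B (the rewrite author's own statement) =====
-- stated objective: faster
-- what changed: Replaces the (A+1)x(B+1) grid with an inner 10-way digit-distribution loop and unbounded integers by a single DP row (first digit 1..9, then one 10-wide sliding-window pass per remaining digit) with modular reduction at every step; Pre_ excludes A < 0 or B < 0, where A raises IndexError on the empty grid/row.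
import Mathlib
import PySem

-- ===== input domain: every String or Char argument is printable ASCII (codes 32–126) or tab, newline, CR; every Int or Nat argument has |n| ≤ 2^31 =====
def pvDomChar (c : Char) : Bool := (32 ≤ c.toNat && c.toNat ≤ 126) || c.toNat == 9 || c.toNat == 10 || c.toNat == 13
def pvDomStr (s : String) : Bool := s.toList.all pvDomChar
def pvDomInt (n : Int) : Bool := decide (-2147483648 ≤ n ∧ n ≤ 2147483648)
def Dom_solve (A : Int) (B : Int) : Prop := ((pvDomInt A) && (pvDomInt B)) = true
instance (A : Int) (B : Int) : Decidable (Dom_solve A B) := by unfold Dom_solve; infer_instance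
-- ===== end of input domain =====

-- B replaces A's (A+1)x(B+1) bigint grid with its inner digit-distribution loop by a
-- single DP row (first digit 1..9, then one 10-wide sliding-window pass per remaining
-- digit) reduced mod 1e9+7 at every step (objective: faster).

-- ===== PORT A =====
-- grid read/update helpers for the list-of-lists grid (all accesses A makes are in range)
def pvGet2 (g : List (List Int)) (i j : Nat) : Int := (g.getD i []).getD j 0
def pvAdd2 (g : List (List Int)) (i j : Nat) (v : Int) : List (List Int) :=
  g.set i ((g.getD i []).set j (pvGet2 g i j + v))
-- the inner `for digit in range(10)` with its `break`
def pvDigitLoop (b i j : Nat) (g : List (List Int)) : List Nat → List (List Int)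
  | [] => g
  | d :: ds => if j + d ≤ b then pvDigitLoop b i j (pvAdd2 g (i+1) (j+d) (pvGet2 g i j)) ds else g

def solve (A : Int) (B : Int) : Int :=
  let a := A.toNat
  let b := B.toNat
  let g0 : List (List Int) := List.replicate (a+1) (List.replicate (b+1) 0)
  let g1 := pvAdd2 g0 0 0 1   -- resultGrid[0][0] = 1 (the cell holds 0)
  let g := (List.range a).foldl (fun g i =>
    (List.range b).foldl (fun g j => pvDigitLoop b i j g (List.range 10)) g) g1
  PySem.Int.mod (pvGet2 g a b) 1000000007

-- ===== PORT B =====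
def solve_alt (A : Int) (B : Int) : Int :=
  if A = 0 then (if B = 0 then 1 else 0) else
  let b := B.toNat
  let M : Int := 1000000007
  -- f = [0]*(B+1); for d in range(1,10): if d <= B: f[d] = 1
  let f0 := (List.range' 1 9).foldl (fun f d => if d ≤ b then f.set d 1 else f)
    (List.replicate (b+1) (0 : Int))
  -- A-1 sliding-window passes
  let f := (List.range (A.toNat - 1)).foldl (fun f _ =>
    ((List.range (b+1)).foldl (fun (gw : List Int × Int) s =>
      let w1 := gw.2 + f.getD s 0                           -- window += f[s]
      let w2 := if 10 ≤ s then w1 - f.getD (s-10) 0 else w1 -- if s >= 10: window -= f[s-10]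
      (gw.1 ++ [PySem.Int.mod w2 M], w2)) (([] : List Int), (0:Int))).1) f0
  PySem.Int.mod (f.getD b 0) M

-- ===== PRECONDITION & SPEC =====
-- Pre_ excludes A < 0 or B < 0, where Python A raises IndexError (empty grid or empty rows).
def Pre_solve (A : Int) (B : Int) : Prop := 0 ≤ A ∧ 0 ≤ B
instance (A : Int) (B : Int) : Decidable (Pre_solve A B) := by unfold Pre_solve; infer_instance
def pvWitness_solve : Int × Int := (3, 5)

def Spec_solve (A : Int) (B : Int) (out : Int) : Prop := out = solve_alt A B
instance (A : Int) (B : Int) (out : Int) : Decidable (Spec_solve A B out) := by unfold Spec_solve; infer_instance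

-- ===== CLAIM (what is proved, stated in full; the proofs are below) =====
def Claim_equal_solve : Prop := ∀ (A : Int) (B : Int), Dom_solve A B → Pre_solve A B → Spec_solve A B (solve A B)

-- ===== LEMMAS AND PROOFS =====

-- the grid as the table of a pure function
def pvTbl (a b : Nat) (F : Nat → Nat → Int) : List (List Int) :=
  (List.range (a+1)).map (fun i => (List.range (b+1)).map (F i))

-- the rows A's loop computes (the source column j only ranges over range b)
def pvR (b : Nat) : Nat → Nat → Int
  | 0, c => if c = 0 then 1 else 0
  | i+1, c => ∑ j ∈ Finset.range b, if j ≤ c ∧ c ≤ j + 9 ∧ c ≤ b then pvR b i j else 0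

-- count of digit strings (digits 0..9) of the given length with the given sum
def pvF : Nat → Nat → Int
  | 0, c => if c = 0 then 1 else 0
  | i+1, c => ∑ d ∈ Finset.range 10, if d ≤ c then pvF i (c - d) else 0

-- rows of B's DP before the modulus: first digit 1..9, then k digits 0..9
def pvG (k c : Nat) : Int := ∑ d ∈ Finset.range 9, if d + 1 ≤ c then pvF k (c - (d+1)) else 0

-- B's sliding window: sum of the last ten row entries
def pvWnd (fv : Nat → Int) (c : Nat) : Int := ∑ u ∈ Finset.Icc (c - 9) c, fv u

theorem pvTbl_get {a b : Nat} (F : Nat → Nat → Int) {i j : Nat} (hi : i ≤ a) (hj : j ≤ b) :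
    pvGet2 (pvTbl a b F) i j = F i j := by
  unfold pvGet2 pvTbl
  rw [PySem.List.getD_map_range _ _ _ _ (by omega), PySem.List.getD_map_range _ _ _ _ (by omega)]

theorem pvTbl_congr {a b : Nat} {F F' : Nat → Nat → Int}
    (h : ∀ i j, i ≤ a → j ≤ b → F i j = F' i j) : pvTbl a b F = pvTbl a b F' := by
  unfold pvTbl
  apply List.map_congr_left
  intro i hi
  apply List.map_congr_left
  intro j hj
  simp only [List.mem_range] at hi hj
  exact h i j (by omega) (by omega)

theorem pvTbl_add {a b : Nat} (F : Nat → Nat → Int) {r c : Nat} (hr : r ≤ a) (hc : c ≤ b) (v : Int) :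
    pvAdd2 (pvTbl a b F) r c v = pvTbl a b (fun i j => if i = r ∧ j = c then F i j + v else F i j) := by
  have hg := pvTbl_get F hr hc
  unfold pvAdd2
  unfold pvTbl at *
  rw [PySem.List.getD_map_range _ _ _ _ (by omega)]
  apply List.ext_getElem
  · simp
  · intro i h1 h2
    simp only [List.getElem_set, List.getElem_map, List.getElem_range]
    simp only [List.length_set, List.length_map, List.length_range] at h1
    by_cases hir : r = i
    · subst hir
      simp only [if_pos rfl]
      apply List.ext_getElem
      · simp
      · intro j hh1 hh2
        simp only [List.length_set, List.length_map, List.length_range] at hh1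
        simp only [List.getElem_set, List.getElem_map, List.getElem_range]
        by_cases hjc : c = j
        · subst hjc
          simp [hg]
        · have hjc' : ¬ j = c := fun h => hjc h.symm
          simp [List.getElem_set, hjc, hjc']
    · simp only [if_neg hir]
      apply List.map_congr_left
      intro j hj
      have : ¬ (i = r ∧ j = c) := fun h => hir h.1.symm
      simp [this]

theorem pvDigitLoop_tbl {a b i j : Nat} (hi : i < a) (hj : j ≤ b) :
    ∀ (n d0 : Nat) (F : Nat → Nat → Int),
    pvDigitLoop b i j (pvTbl a b F) (List.range' d0 n) =
      pvTbl a b (fun r c => if r = i+1 ∧ j + d0 ≤ c ∧ c ≤ b ∧ c < j + d0 + n then F r c + F i j else F r c) := by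
  intro n
  induction n with
  | zero =>
    intro d0 F
    simp only [List.range'_zero, pvDigitLoop]
    exact pvTbl_congr (fun r c _ _ => by rw [if_neg (by omega)])
  | succ n ih =>
    intro d0 F
    rw [List.range'_succ, pvDigitLoop]
    by_cases hg : j + d0 ≤ b
    · rw [if_pos hg, pvTbl_get F (by omega) hj, pvTbl_add F (by omega) (by omega), ih]
      apply pvTbl_congr
      intro r c hr hc
      split_ifs <;> omega
    · rw [if_neg hg]
      exact pvTbl_congr (fun r c _ _ => by rw [if_neg (by omega)])

theorem pvRowLoop_tbl {a b i : Nat} (hi : i < a) :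
    ∀ (k : Nat), k ≤ b → ∀ (F : Nat → Nat → Int),
    (List.range k).foldl (fun g j => pvDigitLoop b i j g (List.range 10)) (pvTbl a b F) =
      pvTbl a b (fun r c => if r = i+1 then
        F r c + ∑ j ∈ Finset.range k, (if j ≤ c ∧ c ≤ j + 9 ∧ c ≤ b then F i j else 0) else F r c) := by
  intro k
  induction k with
  | zero =>
    intro _ F
    simp only [List.range_zero, List.foldl_nil, Finset.sum_range_zero, add_zero]
    exact pvTbl_congr (fun r c _ _ => by split_ifs <;> rfl)
  | succ k ih =>
    intro hk F
    rw [show List.range (k+1) = List.range k ++ [k] from List.range_succ,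
      List.foldl_append, List.foldl_cons, List.foldl_nil, ih (by omega),
      show (List.range 10) = List.range' 0 10 from List.range_eq_range',
      pvDigitLoop_tbl hi (by omega : k ≤ b) 10 0]
    apply pvTbl_congr
    intro r c hr hc
    simp only [Finset.sum_range_succ]
    split_ifs <;> omega

theorem pvOuter_tbl {a b : Nat} : ∀ (k : Nat), k ≤ a →
    (List.range k).foldl (fun g i =>
      (List.range b).foldl (fun g j => pvDigitLoop b i j g (List.range 10)) g)
      (pvTbl a b (fun i j => if i = 0 ∧ j = 0 then 1 else 0)) =
      pvTbl a b (fun r c => if r ≤ k then pvR b r c else 0) := by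
  intro k
  induction k with
  | zero =>
    intro _
    simp only [List.range_zero, List.foldl_nil]
    apply pvTbl_congr
    intro r c _ _
    by_cases hr0 : r = 0 <;> simp [hr0, pvR] <;> omega
  | succ k ih =>
    intro hk
    rw [show List.range (k+1) = List.range k ++ [k] from List.range_succ,
      List.foldl_append, List.foldl_cons, List.foldl_nil, ih (by omega),
      pvRowLoop_tbl (by omega : k < a) b (le_refl b)]
    apply pvTbl_congr
    intro r c hr hc
    by_cases h1 : r = k + 1
    · subst h1
      rw [if_pos rfl, if_neg (by omega : ¬ k + 1 ≤ k), if_pos (by omega : k + 1 ≤ k + 1), zero_add]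
      show (∑ j ∈ Finset.range b, if j ≤ c ∧ c ≤ j + 9 ∧ c ≤ b then
        (if k ≤ k then pvR b k j else 0) else 0) = pvR b (k+1) c
      simp only [le_refl, if_true]
      rfl
    · rw [if_neg h1]
      by_cases h2 : r ≤ k
      · rw [if_pos h2, if_pos (by omega)]
      · rw [if_neg h2, if_neg (by omega)]

theorem pvSolveA (A B : Int) :
    solve A B = PySem.Int.mod (pvR B.toNat A.toNat B.toNat) 1000000007 := by
  show PySem.Int.mod (pvGet2 _ _ _) 1000000007 = _
  have h0 : List.replicate (A.toNat+1) (List.replicate (B.toNat+1) (0:Int)) =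
      pvTbl A.toNat B.toNat (fun _ _ => 0) := by
    simp [pvTbl, List.map_const', List.length_range]
  rw [h0, pvTbl_add _ (by omega) (by omega),
    pvTbl_congr (fun i j _ _ => by split_ifs <;> simp : ∀ i j, i ≤ A.toNat → j ≤ B.toNat →
      (if i = 0 ∧ j = 0 then (0:Int) + 1 else 0) = (if i = 0 ∧ j = 0 then 1 else 0)),
    pvOuter_tbl A.toNat (le_refl _),
    pvTbl_get _ (le_refl _) (le_refl _), if_pos (le_refl _)]

-- reindex a 10-wide window sum by the digit d = c - u
theorem pvWindow_reindex (h : Nat → Int) (c : Nat) :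
    ∑ u ∈ Finset.Icc (c - 9) c, h u = ∑ d ∈ Finset.range 10, if d ≤ c then h (c - d) else 0 := by
  rw [← Finset.sum_filter]
  apply Finset.sum_nbij' (fun u => c - u) (fun d => c - d)
  · intro u hu
    simp only [Finset.mem_filter, Finset.mem_range, Finset.mem_Icc] at *
    omega
  · intro d hd
    simp only [Finset.mem_filter, Finset.mem_range, Finset.mem_Icc] at *
    omega
  · intro u hu
    simp only [Finset.mem_Icc] at hu
    omega
  · intro d hd
    simp only [Finset.mem_filter, Finset.mem_range] at hd
    omega
  · intro u hu
    simp only [Finset.mem_Icc] at hu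
    congr 1
    omega

theorem pvRF {b : Nat} : ∀ (i c : Nat), c < b → pvR b i c = pvF i c := by
  intro i
  induction i with
  | zero => intro c _; rfl
  | succ i ih =>
    intro c hc
    show (∑ j ∈ Finset.range b, if j ≤ c ∧ c ≤ j + 9 ∧ c ≤ b then pvR b i j else 0) = pvF (i+1) c
    have h1 : (∑ j ∈ Finset.range b, if j ≤ c ∧ c ≤ j + 9 ∧ c ≤ b then pvR b i j else 0)
        = ∑ u ∈ Finset.Icc (c - 9) c, pvR b i u := by
      rw [← Finset.sum_filter]
      apply Finset.sum_congr
      · ext u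
        simp only [Finset.mem_filter, Finset.mem_range, Finset.mem_Icc]
        omega
      · intro _ _; rfl
    rw [h1, pvWindow_reindex]
    show _ = ∑ d ∈ Finset.range 10, if d ≤ c then pvF i (c - d) else 0
    apply Finset.sum_congr rfl
    intro d hd
    split_ifs with h
    · exact ih (c - d) (by omega)
    · rfl

-- A's top cell, expressed through pvF: the j < B range forbids a prefix summing to B,
-- so only last digits 1..9 reach it — i.e. A's value is pvG (A-1) B
theorem pvR_top {b : Nat} (i : Nat) : pvR b (i+1) b = pvG i b := by
  show (∑ j ∈ Finset.range b, if j ≤ b ∧ b ≤ j + 9 ∧ b ≤ b then pvR b i j else 0) = _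
  unfold pvG
  rw [← Finset.sum_filter, ← Finset.sum_filter]
  apply Finset.sum_nbij' (fun j => b - 1 - j) (fun d => b - 1 - d)
  · intro j hj
    simp only [Finset.mem_filter, Finset.mem_range] at *
    omega
  · intro d hd
    simp only [Finset.mem_filter, Finset.mem_range] at *
    omega
  · intro j hj
    simp only [Finset.mem_filter, Finset.mem_range] at hj
    omega
  · intro d hd
    simp only [Finset.mem_filter, Finset.mem_range] at hd
    omega
  · intro j hj
    simp only [Finset.mem_filter, Finset.mem_range] at hj
    rw [pvRF i j (by omega)]
    congr 1
    omega

theorem pvWnd_step (fv : Nat → Int) (t : Nat) :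
    pvWnd fv t = (if t = 0 then 0 else pvWnd fv (t-1)) + fv t - (if 10 ≤ t then fv (t - 10) else 0) := by
  unfold pvWnd
  cases t with
  | zero => simp
  | succ c =>
    rw [if_neg (by omega), Finset.sum_Icc_succ_top (by omega)]
    by_cases hc : 9 ≤ c
    · rw [if_pos (by omega)]
      have h1 : Finset.Icc (c - 9) c = insert (c - 9) (Finset.Icc (c + 1 - 9) c) := by
        ext u; simp only [Finset.mem_Icc, Finset.mem_insert]; omega
      have h2 : (c - 9 : Nat) ∉ Finset.Icc (c + 1 - 9) c := by
        simp only [Finset.mem_Icc]; omega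
      have h3 : c + 1 - 1 = c := by omega
      have h4 : c + 1 - 10 = c - 9 := by omega
      rw [h3, h4, h1, Finset.sum_insert h2]
      ring
    · rw [if_neg (by omega)]
      have h3 : c + 1 - 1 = c := by omega
      have h5 : c + 1 - 9 = c - 9 := by omega
      rw [h3, h5]
      ring

theorem pvInner (b : Nat) (M : Int) (fv : Nat → Int) (fl : List Int)
    (hfl : ∀ j, j ≤ b → fl.getD j 0 = fv j) :
    ∀ (t : Nat), t ≤ b + 1 →
    (List.range t).foldl (fun (gw : List Int × Int) j =>
      let w1 := gw.2 + fl.getD j 0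
      let w2 := if 10 ≤ j then w1 - fl.getD (j-10) 0 else w1
      (gw.1 ++ [PySem.Int.mod w2 M], w2)) (([] : List Int), (0:Int))
    = ((List.range t).map (fun c => PySem.Int.mod (pvWnd fv c) M),
        if t = 0 then 0 else pvWnd fv (t-1)) := by
  intro t
  induction t with
  | zero => intro _; simp
  | succ t ih =>
    intro ht
    rw [show List.range (t+1) = List.range t ++ [t] from List.range_succ,
      List.foldl_append, ih (by omega), List.foldl_cons, List.foldl_nil]
    simp only
    rw [hfl t (by omega)]
    have hw2 : (if 10 ≤ t then (if t = 0 then 0 else pvWnd fv (t-1)) + fv t - fl.getD (t-10) 0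
        else (if t = 0 then 0 else pvWnd fv (t-1)) + fv t) = pvWnd fv t := by
      by_cases h10 : 10 ≤ t
      · rw [if_pos h10, hfl (t-10) (by omega), pvWnd_step fv t, if_pos h10]
      · rw [if_neg h10, pvWnd_step fv t, if_neg h10]
        ring
    rw [hw2]
    simp

-- the sliding window advances B's row: window of pvG k is pvG (k+1)
theorem pvG_step (k c : Nat) : pvWnd (pvG k) c = pvG (k+1) c := by
  unfold pvWnd
  rw [pvWindow_reindex (pvG k) c]
  have hL : (∑ d0 ∈ Finset.range 10, if d0 ≤ c then pvG k (c - d0) else 0)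
      = ∑ d0 ∈ Finset.range 10, ∑ d1 ∈ Finset.range 9,
          if d0 + d1 + 1 ≤ c then pvF k (c - (d0 + d1 + 1)) else 0 := by
    apply Finset.sum_congr rfl
    intro d0 _
    by_cases h : d0 ≤ c
    · rw [if_pos h]
      unfold pvG
      apply Finset.sum_congr rfl
      intro d1 _
      split_ifs with h1 h2 h2
      · congr 1
        omega
      · omega
      · omega
      · rfl
    · rw [if_neg h]
      rw [Finset.sum_eq_zero]
      intro d1 _
      rw [if_neg (by omega)]
  rw [hL, Finset.sum_comm]
  unfold pvG
  apply Finset.sum_congr rfl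
  intro d1 _
  by_cases h : d1 + 1 ≤ c
  · rw [if_pos h]
    show _ = pvF k.succ (c - (d1+1))
    show _ = ∑ d0 ∈ Finset.range 10, if d0 ≤ c - (d1+1) then pvF k (c - (d1+1) - d0) else 0
    apply Finset.sum_congr rfl
    intro d0 _
    split_ifs with h1 h2 h2
    · congr 1
      omega
    · omega
    · omega
    · rfl
  · rw [if_neg h]
    rw [Finset.sum_eq_zero]
    intro d0 _
    rw [if_neg (by omega)]

theorem pvRow_mod (M : Int) (hM : 0 < M) (k c : Nat) :
    PySem.Int.mod (pvWnd (fun u => PySem.Int.mod (pvG k u) M) c) M = PySem.Int.mod (pvG (k+1) c) M := by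
  unfold pvWnd
  rw [PySem.Int.mod_eq_emod_of_pos hM, PySem.Int.mod_eq_emod_of_pos hM]
  have h1 : ∀ u, PySem.Int.mod (pvG k u) M = pvG k u % M :=
    fun u => PySem.Int.mod_eq_emod_of_pos hM
  simp only [h1]
  rw [← Finset.sum_int_mod]
  congr 1
  exact pvG_step k c

-- the initial-row builder: getD after the fold of sets
theorem pvSetFold_len (b : Nat) : ∀ (l : List Nat) (f : List Int),
    (l.foldl (fun f d => if d ≤ b then f.set d 1 else f) f).length = f.length := by
  intro l
  induction l with
  | nil => intro f; rfl
  | cons x xs ih =>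
    intro f
    rw [List.foldl_cons, ih]
    split_ifs <;> simp

theorem pvSet_getD (l : List Int) (i j : Nat) (a : Int) :
    (l.set i a).getD j 0 = if i = j ∧ j < l.length then a else l.getD j 0 := by
  simp [List.getD_eq_getElem?_getD, List.getElem?_set]
  split_ifs <;> simp_all <;> omega

theorem pvInit_getD (b c : Nat) : ∀ (n : Nat) (f : List Int), c < f.length →
    ((List.range' 1 n).foldl (fun f d => if d ≤ b then f.set d 1 else f) f).getD c 0
      = if 1 ≤ c ∧ c ≤ n ∧ c ≤ b then 1 else f.getD c 0 := by
  intro n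
  induction n with
  | zero =>
    intro f _
    simp only [List.range'_zero, List.foldl_nil]
    rw [if_neg (by omega)]
  | succ n ih =>
    intro f hc
    rw [List.range'_concat, List.foldl_append, List.foldl_cons, List.foldl_nil,
      show 1 + 1 * n = 1 + n from by omega]
    have hlen := pvSetFold_len b (List.range' 1 n) f
    by_cases hb : 1 + n ≤ b
    · rw [if_pos hb, pvSet_getD, hlen, ih f hc]
      split_ifs <;> omega
    · rw [if_neg hb, ih f hc]
      split_ifs <;> omega

-- the initial row before the modulus: pvG 0 c = [1 ≤ c ≤ 9]
theorem pvG_zero (c : Nat) : pvG 0 c = if 1 ≤ c ∧ c ≤ 9 then 1 else 0 := by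
  unfold pvG
  have h1 : ∀ d ∈ Finset.range 9, (if d + 1 ≤ c then pvF 0 (c - (d+1)) else 0)
      = if c = d + 1 then (1:Int) else 0 := by
    intro d _
    show (if d + 1 ≤ c then (if c - (d+1) = 0 then (1:Int) else 0) else 0) = _
    split_ifs <;> first | rfl | omega
  rw [Finset.sum_congr rfl h1]
  by_cases h : 1 ≤ c ∧ c ≤ 9
  · rw [if_pos h, Finset.sum_eq_single_of_mem (c - 1) (Finset.mem_range.2 (by omega))]
    · rw [if_pos (by omega)]
    · intro d _ hd
      rw [if_neg (by omega)]
  · rw [if_neg h, Finset.sum_eq_zero]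
    intro d hd
    simp only [Finset.mem_range] at hd
    rw [if_neg (by omega)]

theorem pvMod_01 (x : Int) (h : x = 0 ∨ x = 1) : PySem.Int.mod x 1000000007 = x := by
  rcases h with h | h <;> subst h <;> decide

-- B's row after n passes, as a map of the modded pvG row
theorem pvBFold (b : Nat) : ∀ (n : Nat),
    (List.range n).foldl (fun f _ =>
      ((List.range (b+1)).foldl (fun (gw : List Int × Int) s =>
        let w1 := gw.2 + f.getD s 0
        let w2 := if 10 ≤ s then w1 - f.getD (s-10) 0 else w1
        (gw.1 ++ [PySem.Int.mod w2 1000000007], w2)) (([] : List Int), (0:Int))).1)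
      ((List.range' 1 9).foldl (fun f d => if d ≤ b then f.set d 1 else f)
        (List.replicate (b+1) (0 : Int)))
    = (List.range (b+1)).map (fun c => PySem.Int.mod (pvG n c) 1000000007) := by
  intro n
  induction n with
  | zero =>
    simp only [List.range_zero, List.foldl_nil]
    apply List.ext_getElem
    · simp [pvSetFold_len]
    · intro i h1 h2
      rw [pvSetFold_len] at h1
      simp only [List.length_replicate] at h1
      have hg : ((List.range' 1 9).foldl (fun f d => if d ≤ b then f.set d 1 else f)
          (List.replicate (b+1) (0 : Int))).getD i 0
          = if 1 ≤ i ∧ i ≤ 9 ∧ i ≤ b then 1 else 0 := by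
        rw [pvInit_getD b i 9 _ (by simpa using h1)]
        split_ifs <;> simp_all
      rw [List.getElem_map, List.getElem_range, ← List.getD_eq_getElem _ 0, hg]
      rw [pvG_zero]
      split_ifs with hA hB hB
      · exact (pvMod_01 1 (Or.inr rfl)).symm
      · omega
      · omega
      · exact (pvMod_01 0 (Or.inl rfl)).symm
  | succ n ih =>
    rw [show List.range (n+1) = List.range n ++ [n] from List.range_succ,
      List.foldl_append, ih, List.foldl_cons, List.foldl_nil]
    rw [pvInner b 1000000007 (fun u => PySem.Int.mod (pvG n u) 1000000007) _
      (fun j hj => PySem.List.getD_map_range _ _ _ _ (by omega)) (b+1) (le_refl _)]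
    simp only
    apply List.map_congr_left
    intro c _
    exact pvRow_mod 1000000007 (by norm_num) n c

theorem pvSolveB (A B : Int) (hA : ¬ A = 0) :
    solve_alt A B = PySem.Int.mod (pvG (A.toNat - 1) B.toNat) 1000000007 := by
  unfold solve_alt
  rw [if_neg hA]
  simp only
  rw [pvBFold B.toNat (A.toNat - 1),
    PySem.List.getD_map_range _ _ _ _ (by omega)]
  have hM : (0:Int) < 1000000007 := by norm_num
  rw [PySem.Int.mod_eq_emod_of_pos hM, PySem.Int.mod_eq_emod_of_pos hM]
  exact Int.emod_emod_of_dvd _ dvd_rfl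

-- ===== VERDICT (by name: the statement is the Claim_ definition above) =====
theorem solve_spec : Claim_equal_solve := by
  intro A B _ hP
  obtain ⟨hA0, hB0⟩ := hP
  unfold Spec_solve
  rw [pvSolveA]
  by_cases hA : A = 0
  · subst hA
    show PySem.Int.mod (pvR B.toNat 0 B.toNat) 1000000007 = solve_alt 0 B
    unfold solve_alt
    rw [if_pos rfl]
    show PySem.Int.mod (if B.toNat = 0 then 1 else 0) 1000000007 = _
    by_cases hB : B = 0
    · rw [if_pos (by omega), if_pos hB]; decide
    · rw [if_neg (by omega), if_neg hB]; decide
  · rw [pvSolveB A B hA]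
    conv_lhs => rw [show A.toNat = (A.toNat - 1) + 1 from by omega]
    rw [pvR_top]
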